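-- pv_equiv track=rewrite | github.com/Awkward-Studio/indian-alt | bulk_3_synthesize.py | is_relationship_document
-- ===== SOURCE A (Python) =====
-- def is_relationship_document(name, doc_type):
--     doc_name = (name or "").lower()
--     doc_type = (doc_type or "").lower()
--     relationship_markers = (
--         "teaser", "deck", "pitch", "imt", "im ", "information memorandum",
--         "cover", "email", "mail", "mandate", "advisor", "advisory", "banker",
--         "proposal", "introduction", "one pager", "one-pager", "nda"
--     )
--     return any(marker in doc_name or marker in doc_type for marker in relationship_markers)
-- ===== SOURCE B (Python) =====
-- _MARKERS = (
--     "teaser", "deck", "pitch", "imt", "im ", "information memorandum",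
--     "cover", "email", "mail", "mandate", "advisor", "advisory", "banker",
--     "proposal", "introduction", "one pager", "one-pager", "nda"
-- )
--
-- # first-character index: only markers starting with s[i] are tried at position i
-- _BY_FIRST = {}
-- for _m in _MARKERS:
--     _BY_FIRST.setdefault(_m[0], []).append(_m)
--
--
-- def _hit(s):
--     for i, ch in enumerate(s):
--         for m in _BY_FIRST.get(ch, ()):
--             if s.startswith(m, i):
--                 return True
--     return False
--
--
-- def is_relationship_document(name, doc_type):
--     return _hit((name or "").lower()) or _hit((doc_type or "").lower())
-- ===== Notes on version B (the rewrite author's own statement) =====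
-- stated objective: alternative
-- what changed: Replaces A's marker-outer loop of whole-string substring tests by a per-string left-to-right positional scan over a first-character dictionary index built once over the markers, so at each position only markers starting with the current character are prefix-tested.
import Mathlib
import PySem

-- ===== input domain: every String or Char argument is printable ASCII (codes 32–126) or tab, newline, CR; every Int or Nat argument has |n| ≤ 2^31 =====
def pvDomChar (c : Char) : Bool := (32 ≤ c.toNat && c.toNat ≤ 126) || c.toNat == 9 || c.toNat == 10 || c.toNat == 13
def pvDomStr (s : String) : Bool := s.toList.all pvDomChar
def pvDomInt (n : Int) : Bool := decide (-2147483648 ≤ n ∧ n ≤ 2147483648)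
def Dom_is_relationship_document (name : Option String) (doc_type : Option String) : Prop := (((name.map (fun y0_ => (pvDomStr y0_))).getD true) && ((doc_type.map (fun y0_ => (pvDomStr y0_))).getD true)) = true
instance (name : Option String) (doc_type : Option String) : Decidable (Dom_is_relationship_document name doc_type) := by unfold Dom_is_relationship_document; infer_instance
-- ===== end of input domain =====

-- B replaces A's marker-outer loop of whole-string substring tests by a per-string
-- positional scan over a first-character dictionary index of the markers (alternative).

-- ===== PORT A =====
-- A's tuple of markers, as it appears inside A
def pvMarkersA : List String :=
  ["teaser", "deck", "pitch", "imt", "im ", "information memorandum",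
   "cover", "email", "mail", "mandate", "advisor", "advisory", "banker",
   "proposal", "introduction", "one pager", "one-pager", "nda"]

def is_relationship_document (name : Option String) (doc_type : Option String) : Bool :=
  -- (name or "").lower(): for Option String, None → "" and Some "" → "" coincide with getD ""
  let doc_name := PySem.Str.lower (name.getD "")
  let dt := PySem.Str.lower (doc_type.getD "")
  pvMarkersA.any (fun marker => PySem.Str.isIn marker doc_name || PySem.Str.isIn marker dt)

-- ===== PORT B =====
def pvMarkersB : List String :=
  ["teaser", "deck", "pitch", "imt", "im ", "information memorandum",
   "cover", "email", "mail", "mandate", "advisor", "advisory", "banker",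
   "proposal", "introduction", "one pager", "one-pager", "nda"]

-- Source B: _BY_FIRST = {}; for m in _MARKERS: _BY_FIRST.setdefault(m[0], []).append(m)
-- setdefault(k, []).append(m) is exactly Dict.modify k [] (· ++ [m]); m[0] is headD
-- (every marker is nonempty, so headD never yields the dummy ' ')
def pvByFirst : PySem.Dict Char (List String) :=
  (pvMarkersB.map (fun m => (m.toList.headD ' ', m))).foldl
    (fun d p => d.modify p.1 [] (· ++ [p.2])) PySem.Dict.empty

-- Source B's _hit: for i, ch in enumerate(s): for m in _BY_FIRST.get(ch, ()):
--   if s.startswith(m, i): return True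
-- the scan over positions i is recursion over the suffixes of s.toList;
-- s.startswith(m, i) is 'm.toList is a prefix of the current suffix'
def pvHitAux : List Char → Bool
  | [] => false
  | c :: rest =>
      (pvByFirst.getD c []).any (fun m => m.toList.isPrefixOf (c :: rest)) || pvHitAux rest

def pvHit (s : String) : Bool := pvHitAux s.toList

def is_relationship_document_alt (name : Option String) (doc_type : Option String) : Bool :=
  pvHit (PySem.Str.lower (name.getD "")) || pvHit (PySem.Str.lower (doc_type.getD ""))

-- ===== PRECONDITION & SPEC =====
def Spec_is_relationship_document (name : Option String) (doc_type : Option String) (out : Bool) : Prop := out = is_relationship_document_alt name doc_type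
instance (name : Option String) (doc_type : Option String) (out : Bool) : Decidable (Spec_is_relationship_document name doc_type out) := by unfold Spec_is_relationship_document; infer_instance

-- ===== CLAIM =====
def Claim_equal_is_relationship_document : Prop := ∀ (name : Option String) (doc_type : Option String), Dom_is_relationship_document name doc_type → Spec_is_relationship_document name doc_type (is_relationship_document name doc_type)

-- ===== LEMMAS AND PROOFS =====

lemma pv_markers_ne : ∀ m ∈ pvMarkersB, m.toList ≠ [] := by decide

-- the bucket for c is exactly the markers whose first character is c
lemma pv_bucket_eq (c : Char) :
    pvByFirst.getD c [] = pvMarkersB.filter (fun m => m.toList.headD ' ' == c) := by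
  unfold pvByFirst
  rw [PySem.Dict.getD_foldl_modify_append, PySem.Dict.getD_empty]
  rw [List.filter_map, List.map_map]
  simp [Function.comp_def]

-- markers not starting with c can never be a prefix of c :: t, so the bucket suffices
lemma pv_bucket_any (c : Char) (t : List Char) :
    (pvByFirst.getD c []).any (fun m => m.toList.isPrefixOf (c :: t)) =
    pvMarkersB.any (fun m => m.toList.isPrefixOf (c :: t)) := by
  rw [pv_bucket_eq, Bool.eq_iff_iff]
  simp only [List.any_eq_true, List.mem_filter]
  constructor
  · rintro ⟨m, ⟨hm, _⟩, h⟩; exact ⟨m, hm, h⟩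
  · rintro ⟨m, hm, h⟩
    refine ⟨m, ⟨hm, ?_⟩, h⟩
    have hne := pv_markers_ne m hm
    rw [List.isPrefixOf_iff_prefix] at h
    cases hml : m.toList with
    | nil => exact absurd hml hne
    | cons a as =>
        rw [hml, List.cons_prefix_cons] at h
        simp [h.1]

-- the suffix scan finds a marker iff some marker occurs as a substring
lemma pvHitAux_eq (l : List Char) :
    pvHitAux l = pvMarkersB.any (fun m => PySem.Chars.isIn m.toList l) := by
  induction l with
  | nil => decide
  | cons c rest ih =>
      rw [pvHitAux, pv_bucket_any, ih, Bool.eq_iff_iff]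
      simp only [Bool.or_eq_true, List.any_eq_true, List.isPrefixOf_iff_prefix,
        PySem.Chars.isIn_iff_infix, List.infix_cons_iff]
      constructor
      · rintro (⟨m, hm, h⟩ | ⟨m, hm, h⟩)
        · exact ⟨m, hm, Or.inl h⟩
        · exact ⟨m, hm, Or.inr h⟩
      · rintro ⟨m, hm, h | h⟩
        · exact Or.inl ⟨m, hm, h⟩
        · exact Or.inr ⟨m, hm, h⟩

lemma pvHit_eq (s : String) :
    pvHit s = pvMarkersB.any (fun m => PySem.Str.isIn m s) := by
  unfold pvHit
  rw [pvHitAux_eq]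
  simp [PySem.Str.isIn_eq]

-- ===== VERDICT =====
theorem is_relationship_document_spec : Claim_equal_is_relationship_document := by
  intro name doc_type _
  unfold Spec_is_relationship_document is_relationship_document is_relationship_document_alt
  rw [pvHit_eq, pvHit_eq]
  show pvMarkersA.any _ = _
  have hMM : pvMarkersB = pvMarkersA := rfl
  rw [hMM, Bool.eq_iff_iff]
  simp only [List.any_eq_true, Bool.or_eq_true]
  constructor
  · rintro ⟨m, hm, h | h⟩
    · exact Or.inl ⟨m, hm, h⟩
    · exact Or.inr ⟨m, hm, h⟩
  · rintro (⟨m, hm, h⟩ | ⟨m, hm, h⟩)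
    · exact ⟨m, hm, Or.inl h⟩
    · exact ⟨m, hm, Or.inr h⟩
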